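-- pv_equiv track=rewrite | github.com/ShreySavaliya/sales_transcripts_sentiment_analysis | new_files/visualize_sentiments.py | merge_sentiment_scores
-- ===== SOURCE A (Python) =====
-- def merge_sentiment_scores(sentiment_scores):
--     merged_scores = {}
--     for score in sentiment_scores:
--         for sentiment, value in score.items():
--             if sentiment in merged_scores:
--                 merged_scores[sentiment] += value
--             else:
--                 merged_scores[sentiment] = value
--     return merged_scores
-- ===== SOURCE B (Python) =====
-- def merge_sentiment_scores(sentiment_scores):
--     keys = dict.fromkeys(k for score in sentiment_scores for k in score)
--     return {k: sum(score.get(k, 0) for score in sentiment_scores) for k in keys}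
-- ===== Notes on version B (the rewrite author's own statement) =====
-- stated objective: alternative
-- what changed: Replaces the single-pass running dict accumulation with a key-indexed traversal: first collect the distinct sentiment keys in first-appearance order with dict.fromkeys, then build the result as a dict comprehension summing score.get(k, 0) over the whole list for each key.
import Mathlib
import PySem

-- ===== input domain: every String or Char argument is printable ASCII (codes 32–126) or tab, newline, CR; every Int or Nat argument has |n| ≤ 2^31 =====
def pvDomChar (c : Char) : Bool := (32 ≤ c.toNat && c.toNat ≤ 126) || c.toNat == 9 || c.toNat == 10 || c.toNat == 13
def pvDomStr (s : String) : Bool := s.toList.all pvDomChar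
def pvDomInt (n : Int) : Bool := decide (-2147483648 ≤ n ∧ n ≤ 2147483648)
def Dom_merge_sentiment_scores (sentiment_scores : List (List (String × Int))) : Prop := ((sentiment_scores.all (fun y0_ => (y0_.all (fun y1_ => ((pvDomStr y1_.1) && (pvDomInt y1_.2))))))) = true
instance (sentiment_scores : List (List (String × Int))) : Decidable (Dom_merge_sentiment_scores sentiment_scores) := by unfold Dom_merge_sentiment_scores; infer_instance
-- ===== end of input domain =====

-- B replaces A's running dict accumulation by a per-key re-scan of the list (same cost class, different traversal shape).

-- ===== PORT A =====
def merge_sentiment_scores (sentiment_scores : List (List (String × Int))) : List (String × Int) :=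
  (sentiment_scores.foldl
    (fun merged_scores score =>
      score.foldl
        (fun m p =>
          if m.contains p.1 then
            m.insert p.1 (m.getD p.1 0 + p.2)
          else
            m.insert p.1 p.2)
        merged_scores)
    PySem.Dict.empty).items

-- ===== PORT B =====
def merge_sentiment_scores_alt (sentiment_scores : List (List (String × Int))) : List (String × Int) :=
  let keys := PySem.List.dedup (sentiment_scores.flatMap (fun score => score.map Prod.fst))
  keys.map (fun k =>
    (k, sentiment_scores.foldl (fun acc score => acc + (PySem.Dict.mk score).getD k 0) 0))

-- ===== PRECONDITION & SPEC =====
-- Pre_ requires each inner list to have distinct keys: the inner lists model Python dicts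
-- (whose keys are necessarily unique), so no Python input A accepts is excluded.
def Pre_merge_sentiment_scores (sentiment_scores : List (List (String × Int))) : Prop :=
  ∀ score ∈ sentiment_scores, (score.map Prod.fst).Nodup
instance (sentiment_scores : List (List (String × Int))) : Decidable (Pre_merge_sentiment_scores sentiment_scores) := by unfold Pre_merge_sentiment_scores; infer_instance
def pvWitness_merge_sentiment_scores : (List (List (String × Int))) := [[("pos", 3), ("neg", -1)], [("neg", 2)], []]
def Spec_merge_sentiment_scores (sentiment_scores : List (List (String × Int))) (out : List (String × Int)) : Prop := out = merge_sentiment_scores_alt sentiment_scores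
instance (sentiment_scores : List (List (String × Int))) (out : List (String × Int)) : Decidable (Spec_merge_sentiment_scores sentiment_scores out) := by unfold Spec_merge_sentiment_scores; infer_instance

-- ===== CLAIM (what is proved, stated in full; the proofs are below) =====
def Claim_equal_merge_sentiment_scores : Prop := ∀ (sentiment_scores : List (List (String × Int))), Dom_merge_sentiment_scores sentiment_scores → Pre_merge_sentiment_scores sentiment_scores → Spec_merge_sentiment_scores sentiment_scores (merge_sentiment_scores sentiment_scores)

-- ===== LEMMAS AND PROOFS =====

-- A's loop body, with the branch pushed inside the insert (pointwise-equal function).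
theorem stepA_eq :
    (fun (m : PySem.Dict String Int) (p : String × Int) =>
      if m.contains p.1 then m.insert p.1 (m.getD p.1 0 + p.2) else m.insert p.1 p.2)
    = fun m p => m.insert p.1 (m.getD p.1 0 + p.2) := by
  funext m p
  by_cases h : m.contains p.1 = true
  · simp [h]
  · rw [if_neg h, PySem.Dict.getD_of_not_contains m 0 (by simpa using h), zero_add]

-- Inner loop: one dict's pairs, with distinct keys, add (mk score).getD k 0 to every key's tally.
theorem inner_getD (score : List (String × Int)) (h : (score.map Prod.fst).Nodup)
    (d : PySem.Dict String Int) (k : String) :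
    (score.foldl (fun m p => m.insert p.1 (m.getD p.1 0 + p.2)) d).getD k 0
      = d.getD k 0 + (PySem.Dict.mk score).getD k 0 := by
  induction score generalizing d with
  | nil => simp [PySem.Dict.getD_eq_get?_getD, PySem.Dict.get?]
  | cons p rest ih =>
      simp only [List.map_cons, List.nodup_cons] at h
      rw [List.foldl_cons, ih h.2, PySem.Dict.getD_insert,
        PySem.Dict.getD_eq_get?_getD (PySem.Dict.mk (p :: rest)), PySem.Dict.get?_mk_cons]
      by_cases hk : k = p.1
      · have hnc : (PySem.Dict.mk rest).contains k = false := by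
          rw [PySem.Dict.contains_eq_decide_mem_keys, PySem.Dict.keys_mk]
          simp [hk, h.1]
        rw [PySem.Dict.getD_of_not_contains _ 0 hnc]
        simp [hk]
      · have hb : (p.1 == k) = false := by simp [Ne.symm hk]
        rw [if_neg hk, hb]
        simp [PySem.Dict.getD_eq_get?_getD]

-- Outer loop: A's accumulated tally at k is B's per-key sum.
theorem outer_getD (ss : List (List (String × Int))) (h : ∀ s ∈ ss, (s.map Prod.fst).Nodup)
    (d : PySem.Dict String Int) (k : String) :
    (ss.foldl (fun m s => s.foldl (fun m p => m.insert p.1 (m.getD p.1 0 + p.2)) m) d).getD k 0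
      = ss.foldl (fun acc s => acc + (PySem.Dict.mk s).getD k 0) (d.getD k 0) := by
  induction ss generalizing d with
  | nil => rfl
  | cons s rest ih =>
      rw [List.foldl_cons, List.foldl_cons,
        ih (fun t ht => h t (List.mem_cons_of_mem _ ht)),
        inner_getD s (h s (List.mem_cons_self ..))]

-- The keys of A's accumulated dict, in insertion order.
theorem keys_nested (ss : List (List (String × Int))) (d : PySem.Dict String Int) :
    (ss.foldl (fun m s => s.foldl (fun m p => m.insert p.1 (m.getD p.1 0 + p.2)) m) d).keys
      = PySem.Set.update d.keys (ss.flatMap (fun score => score.map Prod.fst)) := by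
  induction ss generalizing d with
  | nil => simp [PySem.Set.update]
  | cons s rest ih =>
      rw [List.foldl_cons, List.flatMap_cons, PySem.Set.update_append, ih,
        PySem.Dict.keys_foldl_insert_key s Prod.fst]

-- ===== VERDICT (by name: the statement is the Claim_ definition above) =====
theorem merge_sentiment_scores_spec : Claim_equal_merge_sentiment_scores := by
  intro ss _ hpre
  unfold Spec_merge_sentiment_scores merge_sentiment_scores merge_sentiment_scores_alt
  rw [stepA_eq]
  have hkeys : (ss.foldl (fun m s => s.foldl (fun m p => m.insert p.1 (m.getD p.1 0 + p.2)) m)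
      PySem.Dict.empty).keys = PySem.List.dedup (ss.flatMap (fun score => score.map Prod.fst)) := by
    rw [PySem.List.dedup_eq_ofList, ← PySem.Set.update_empty, keys_nested]
    rfl
  have hnd : (ss.foldl (fun m s => s.foldl (fun m p => m.insert p.1 (m.getD p.1 0 + p.2)) m)
      PySem.Dict.empty).keys.Nodup := by
    rw [hkeys]; exact PySem.List.nodup_dedup _
  rw [PySem.Dict.items_eq_map_keys _ hnd 0, hkeys]
  apply List.map_congr_left
  intro k _
  rw [outer_getD ss hpre]
  rw [PySem.Dict.getD_empty ..]
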